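-- pv_equiv track=rewrite | github.com/nuuuwan/writing | src/writing/docjson.py | md_line_to_docjson
-- ===== SOURCE A (Python) =====
-- def md_line_to_docjson(line):
--     """Convert MD line to DocJSON."""
--     tag = 'p'
--     text = line
--     for i in range(1, 10):
--         header_text = ('#' * (i)) + ' '
--         if line[: i + 1] == header_text:
--             tag = 'h%d' % i
--             text = line[i + 1 :]
--             break
--
--     return {
--         'tag': tag,
--         'text': text,
--     }
-- ===== SOURCE B (Python) =====
-- def md_line_to_docjson(line):
--     """Convert MD line to DocJSON."""
--     rest = line.lstrip('#')
--     n = len(line) - len(rest)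
--     if 1 <= n <= 9 and rest[:1] == ' ':
--         return {'tag': 'h%d' % n, 'text': rest[1:]}
--     return {'tag': 'p', 'text': line}
-- ===== Notes on version B (the rewrite author's own statement) =====
-- stated objective: simpler
-- what changed: Replaces the loop over header widths 1..9 (building the candidate header prefix and comparing a slice on each iteration) by a single count of the leading hash characters via lstrip followed by one guard.
import Mathlib
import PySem

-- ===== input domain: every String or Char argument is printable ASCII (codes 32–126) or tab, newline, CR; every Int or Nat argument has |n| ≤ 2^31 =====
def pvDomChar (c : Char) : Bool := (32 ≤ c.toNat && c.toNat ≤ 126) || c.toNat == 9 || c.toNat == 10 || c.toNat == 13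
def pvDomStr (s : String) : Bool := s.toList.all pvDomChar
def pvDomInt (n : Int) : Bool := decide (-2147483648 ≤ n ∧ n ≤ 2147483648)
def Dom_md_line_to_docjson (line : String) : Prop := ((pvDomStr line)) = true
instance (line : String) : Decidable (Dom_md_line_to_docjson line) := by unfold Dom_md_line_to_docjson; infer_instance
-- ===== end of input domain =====

-- B replaces A's loop over header widths 1..9 (slice-and-compare each width) by one count of
-- leading '#' characters plus a single guard; objective: simpler.


-- ===== PORT A =====
-- the for-loop with break: scan i = 1,…,9; on the first i with line[:i+1] == '#'*i + ' '
-- return ('h%d' % i, line[i+1:]); if none matches, ('p', line).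
def mdHeaderScan (cs : List Char) (i : Nat) : String × List Char :=
  if _h : i < 10 then
    let header := PySem.List.pyRepeat ['#'] (i : Int) ++ [' ']   -- '#' * i + ' '
    if PySem.List.slice cs none (some ((i : Int) + 1)) = header then
      ("h" ++ PySem.Int.toStr (i : Int), PySem.List.slice cs (some ((i : Int) + 1)) none)
    else mdHeaderScan cs (i + 1)
  else ("p", cs)
  termination_by 10 - i

def md_line_to_docjson (line : String) : List (String × String) :=
  let r := mdHeaderScan line.toList 1
  [("tag", r.1), ("text", String.ofList r.2)]

-- ===== PORT B =====
def md_line_to_docjson_alt (line : String) : List (String × String) :=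
  let cs := line.toList
  let rest := cs.dropWhile (· == '#')          -- line.lstrip('#'): exact (the strip set is the single char '#')
  let n := cs.length - rest.length
  if 1 ≤ n ∧ n ≤ 9 ∧ PySem.List.slice rest none (some 1) = [' '] then
    [("tag", "h" ++ PySem.Int.toStr (n : Int)), ("text", String.ofList (PySem.List.slice rest (some 1) none))]
  else
    [("tag", "p"), ("text", line)]

-- ===== PRECONDITION & SPEC =====
def Spec_md_line_to_docjson (line : String) (out : List (String × String)) : Prop := out = md_line_to_docjson_alt line
instance (line : String) (out : List (String × String)) : Decidable (Spec_md_line_to_docjson line out) := by unfold Spec_md_line_to_docjson; infer_instance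

-- ===== CLAIM (what is proved, stated in full; the proofs are below) =====
def Claim_equal_md_line_to_docjson : Prop := ∀ (line : String), Dom_md_line_to_docjson line → Spec_md_line_to_docjson line (md_line_to_docjson line)

-- ===== LEMMAS AND PROOFS =====

-- takeWhile / dropWhile of 'replicate i '#' ++ ' ' :: rest'
lemma tw_rep (i : Nat) (rest : List Char) :
    (List.replicate i '#' ++ ' ' :: rest).takeWhile (· == '#') = List.replicate i '#' ∧
    (List.replicate i '#' ++ ' ' :: rest).dropWhile (· == '#') = ' ' :: rest := by
  induction i with
  | zero => simp [List.dropWhile]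
  | succ k ih => simp [List.replicate_succ, ih]

lemma take_rep (i : Nat) (rest : List Char) :
    (List.replicate i '#' ++ rest).take (i + 1) = List.replicate i '#' ++ rest.take 1 := by
  induction i with
  | zero => cases rest <;> simp
  | succ k ih => simpa [List.replicate_succ] using ih

lemma drop_rep (i : Nat) (rest : List Char) :
    (List.replicate i '#' ++ rest).drop (i + 1) = rest.drop 1 := by
  induction i with
  | zero => simp
  | succ k ih => simpa [List.replicate_succ] using ih

-- cs splits as its leading hashes followed by the rest
lemma split_hash (cs : List Char) :
    cs = List.replicate (cs.takeWhile (· == '#')).length '#' ++ cs.dropWhile (· == '#') := by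
  have h : cs.takeWhile (· == '#') = List.replicate (cs.takeWhile (· == '#')).length '#' := by
    apply List.eq_replicate_of_mem
    intro c hc
    have := List.mem_takeWhile_imp hc
    simpa using this
  conv_lhs => rw [← List.takeWhile_append_dropWhile (p := (· == '#')) (l := cs)]
  rw [← h]

-- A's loop condition holds at width i iff i is exactly the number of leading hashes and a space follows
lemma cond_iff (cs : List Char) (i : Nat) :
    cs.take (i + 1) = List.replicate i '#' ++ [' '] ↔
      ((cs.takeWhile (· == '#')).length = i ∧ (cs.dropWhile (· == '#')).take 1 = [' ']) := by
  constructor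
  · intro h
    have hlen : i + 1 ≤ cs.length := by
      have := congrArg List.length h
      simp [List.length_take] at this
      omega
    have hcs : cs = List.replicate i '#' ++ ' ' :: cs.drop (i + 1) := by
      conv_lhs => rw [← List.take_append_drop (i + 1) cs]
      rw [h]; simp
    rw [hcs]
    rcases tw_rep i (cs.drop (i + 1)) with ⟨h1, h2⟩
    rw [h1, h2]
    simp
  · rintro ⟨hn, hsp⟩
    obtain ⟨r', hr⟩ : ∃ r', cs.dropWhile (· == '#') = ' ' :: r' := by
      cases hdw : cs.dropWhile (· == '#') with
      | nil => rw [hdw] at hsp; simp at hsp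
      | cons a t =>
        rw [hdw] at hsp
        simp at hsp
        exact ⟨t, by rw [hsp]⟩
    have hcs := split_hash cs
    rw [hn, hr] at hcs
    rw [hcs, take_rep]
    simp

-- the text A extracts at width i equals the text B extracts
lemma drop_eq (cs : List Char) (i : Nat)
    (hn : (cs.takeWhile (· == '#')).length = i)
    (hsp : (cs.dropWhile (· == '#')).take 1 = [' ']) :
    cs.drop (i + 1) = (cs.dropWhile (· == '#')).drop 1 := by
  have hcs := split_hash cs
  rw [hn] at hcs
  conv_lhs => rw [hcs]
  rw [drop_rep]

-- unfolding of one step of A's loop, with the PySem primitives reduced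
lemma scan_step (cs : List Char) (i : Nat) (h : i < 10) :
    mdHeaderScan cs i =
      if cs.take (i + 1) = List.replicate i '#' ++ [' '] then
        ("h" ++ PySem.Int.toStr (i : Int), cs.drop (i + 1))
      else mdHeaderScan cs (i + 1) := by
  rw [mdHeaderScan]
  have h1 : PySem.List.pyRepeat ['#'] (i : Int) = List.replicate i '#' := by
    simp [PySem.List.pyRepeat_singleton]
  have h2 : PySem.List.slice cs none (some ((i : Int) + 1)) = cs.take (i + 1) := by
    have : ((i : Int) + 1) = ((i + 1 : Nat) : Int) := by push_cast; ring
    rw [this, PySem.List.slice_to_natCast]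
  have h3 : PySem.List.slice cs (some ((i : Int) + 1)) none = cs.drop (i + 1) := by
    have : ((i : Int) + 1) = ((i + 1 : Nat) : Int) := by push_cast; ring
    rw [this, PySem.List.slice_from_natCast]
  simp only [h, dif_pos, h1, h2, h3]

-- if no width in [i,9] matches, the loop falls through to ('p', cs)
lemma scan_none (cs : List Char) :
    ∀ d i, i + d = 10 →
      (∀ j, i ≤ j → j ≤ 9 → ¬ cs.take (j + 1) = List.replicate j '#' ++ [' ']) →
      mdHeaderScan cs i = ("p", cs) := by
  intro d
  induction d with
  | zero =>
    intro i hi _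
    rw [mdHeaderScan]
    simp [show ¬ i < 10 by omega]
  | succ k ih =>
    intro i hi hno
    have hlt : i < 10 := by omega
    rw [scan_step cs i hlt, if_neg (hno i le_rfl (by omega))]
    exact ih (i + 1) (by omega) (fun j hj1 hj2 => hno j (by omega) hj2)

-- if width n matches (and no other width can), the loop returns the header result
lemma scan_hit (cs : List Char) (n : Nat) (hn9 : n ≤ 9)
    (hcond : cs.take (n + 1) = List.replicate n '#' ++ [' '])
    (huniq : ∀ j, cs.take (j + 1) = List.replicate j '#' ++ [' '] → j = n) :
    ∀ d i, i + d = 10 → i ≤ n →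
      mdHeaderScan cs i = ("h" ++ PySem.Int.toStr (n : Int), cs.drop (n + 1)) := by
  intro d
  induction d with
  | zero => intro i hi hin; omega
  | succ k ih =>
    intro i hi hin
    have hlt : i < 10 := by omega
    rw [scan_step cs i hlt]
    by_cases hc : cs.take (i + 1) = List.replicate i '#' ++ [' ']
    · have : i = n := huniq i hc
      subst this
      rw [if_pos hc]
    · rw [if_neg hc]
      have hne : i ≠ n := fun h => hc (h ▸ hcond)
      exact ih (i + 1) (by omega) (by omega)

theorem main_equal (line : String) : md_line_to_docjson line = md_line_to_docjson_alt line := by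
  simp only [md_line_to_docjson, md_line_to_docjson_alt]
  have hlen : line.toList.length - (line.toList.dropWhile (· == '#')).length
      = (line.toList.takeWhile (· == '#')).length := by
    have h := congrArg List.length
      (List.takeWhile_append_dropWhile (p := (· == '#')) (l := line.toList))
    have hb : line.toList.length = line.length := by simp
    simp only [List.length_append] at h
    omega
  have hsl1 : PySem.List.slice (line.toList.dropWhile (· == '#')) none (some 1)
      = (line.toList.dropWhile (· == '#')).take 1 := by
    have h1 : (1 : Int) = ((1 : Nat) : Int) := by norm_num
    rw [h1, PySem.List.slice_to_natCast]
  have hsl2 : PySem.List.slice (line.toList.dropWhile (· == '#')) (some 1) none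
      = (line.toList.dropWhile (· == '#')).drop 1 := by
    have h1 : (1 : Int) = ((1 : Nat) : Int) := by norm_num
    rw [h1, PySem.List.slice_from_natCast]
  rw [hlen, hsl1, hsl2]
  set cs := line.toList with hcs
  set n := (cs.takeWhile (· == '#')).length with hn
  by_cases hg : 1 ≤ n ∧ n ≤ 9 ∧ (cs.dropWhile (· == '#')).take 1 = [' ']
  · rcases hg with ⟨h1, h9, hsp⟩
    have hcond : cs.take (n + 1) = List.replicate n '#' ++ [' '] :=
      (cond_iff cs n).mpr ⟨rfl, hsp⟩
    have huniq : ∀ j, cs.take (j + 1) = List.replicate j '#' ++ [' '] → j = n := by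
      intro j hj
      have := (cond_iff cs j).mp hj
      omega
    rw [scan_hit cs n h9 hcond huniq 9 1 (by omega) h1]
    rw [if_pos ⟨h1, h9, hsp⟩]
    rw [drop_eq cs n rfl hsp]
  · have hno : ∀ j, 1 ≤ j → j ≤ 9 → ¬ cs.take (j + 1) = List.replicate j '#' ++ [' '] := by
      intro j hj1 hj9 hj
      rcases (cond_iff cs j).mp hj with ⟨hje, hsp'⟩
      exact hg ⟨by omega, by omega, hsp'⟩
    rw [scan_none cs 9 1 (by omega) hno, if_neg hg]
    simp [hcs]

-- ===== VERDICT (by name: the statement is the Claim_ definition above) =====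
theorem md_line_to_docjson_spec : Claim_equal_md_line_to_docjson := by
  intro line _
  unfold Spec_md_line_to_docjson
  exact main_equal line
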